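-- pv_equiv track=rewrite | github.com/mojomast/Beatrice | bot/profile_tools.py | _ordered_members
-- ===== SOURCE A (Python) =====
-- from typing import Mapping, Sequence
--
-- def _ordered_members(members: Sequence[str], active_nicks: Sequence[str]) -> list[str]:
--     member_map = {member.casefold(): member.strip() for member in members if member.strip()}
--     ordered: list[str] = []
--     for nick in active_nicks:
--         key = nick.strip().casefold()
--         if key in member_map and member_map[key] not in ordered:
--             ordered.append(member_map[key])
--     for member in sorted(member_map.values(), key=str.casefold):
--         if member not in ordered:
--             ordered.append(member)
--     return ordered
-- ===== SOURCE B (Python) =====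
-- def _ordered_members(members, active_nicks):
--     member_map = {member.casefold(): member.strip() for member in members if member.strip()}
--     rank = {}
--     for i, nick in enumerate(active_nicks):
--         v = member_map.get(nick.strip().casefold())
--         if v is not None and v not in rank:
--             rank[v] = i
--     sentinel = len(active_nicks)
--     vals = dict.fromkeys(member_map.values())
--     return sorted(vals, key=lambda v: (rank.get(v, sentinel), v.casefold()))
-- ===== Notes on version B (the rewrite author's own statement) =====
-- stated objective: faster
-- what changed: Replaces A's two-phase build (append active members with list-membership dedup, then scan a sorted copy appending absentees) by an activation-rank table plus one composite-key sort: rank maps each member value to the index of its first activating nick, and the result is sorted(dedup(values), key=(rank.get(v, len(active_nicks)), v.casefold())).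
import Mathlib
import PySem

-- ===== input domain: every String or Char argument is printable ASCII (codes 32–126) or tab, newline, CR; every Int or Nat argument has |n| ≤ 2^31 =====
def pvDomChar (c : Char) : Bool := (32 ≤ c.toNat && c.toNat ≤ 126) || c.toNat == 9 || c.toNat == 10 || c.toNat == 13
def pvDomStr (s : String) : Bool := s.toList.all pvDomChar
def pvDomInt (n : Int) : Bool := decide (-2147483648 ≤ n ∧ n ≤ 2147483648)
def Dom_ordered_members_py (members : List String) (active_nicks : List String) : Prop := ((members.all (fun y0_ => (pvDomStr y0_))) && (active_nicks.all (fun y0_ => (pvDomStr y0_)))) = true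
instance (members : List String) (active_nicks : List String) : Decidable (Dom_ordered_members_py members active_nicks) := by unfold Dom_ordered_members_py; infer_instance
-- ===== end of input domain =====

-- B replaces A's two-phase append-with-dedup build (quadratic list-membership tests) by an
-- activation-rank table plus one composite-key sort of the distinct member values (objective: faster, measured).
-- str.casefold() is ported as PySem.Str.lower — exact on the ASCII domain above.

-- ===== PORT A =====
-- shared helper: the dict comprehension {member.casefold(): member.strip() for member in members if member.strip()}
-- (this line is identical in A and B; both ports call it)
def pvMemberMap (members : List String) : PySem.Dict String String :=
  members.foldl
    (fun d member =>
      if PySem.Str.strip member ≠ "" then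
        d.insert (PySem.Str.lower member) (PySem.Str.strip member)
      else d)
    PySem.Dict.empty

def ordered_members_py (members : List String) (active_nicks : List String) : List String :=
  let member_map := pvMemberMap members
  let ordered : List String :=
    active_nicks.foldl
      (fun ordered nick =>
        match member_map.get? (PySem.Str.lower (PySem.Str.strip nick)) with
        | some v => if v ∈ ordered then ordered else ordered ++ [v]
        | none => ordered)
      []
  (PySem.List.sorted member_map.values (fun m => PySem.Str.lower m) false).foldl
    (fun ordered member => if member ∈ ordered then ordered else ordered ++ [member])
    ordered

-- ===== PORT B =====
def ordered_members_py_alt (members : List String) (active_nicks : List String) : List String :=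
  let member_map := pvMemberMap members
  let rank : PySem.Dict String Int :=
    (PySem.List.enumerate active_nicks).foldl
      (fun rank p =>
        match member_map.get? (PySem.Str.lower (PySem.Str.strip p.2)) with
        | some v => if rank.contains v then rank else rank.insert v p.1
        | none => rank)
      PySem.Dict.empty
  let sentinel : Int := (active_nicks.length : Int)
  PySem.List.sorted2 (PySem.List.dedup member_map.values)
    (fun v => rank.getD v sentinel) (fun v => PySem.Str.lower v) false

-- ===== PRECONDITION & SPEC =====
def Spec_ordered_members_py (members : List String) (active_nicks : List String) (out : List String) : Prop := out = ordered_members_py_alt members active_nicks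
instance (members : List String) (active_nicks : List String) (out : List String) : Decidable (Spec_ordered_members_py members active_nicks out) := by unfold Spec_ordered_members_py; infer_instance

-- ===== CLAIM (what is proved, stated in full; the proofs are below) =====
def Claim_equal_ordered_members_py : Prop := ∀ (members : List String) (active_nicks : List String), Dom_ordered_members_py members active_nicks → Spec_ordered_members_py members active_nicks (ordered_members_py members active_nicks)

-- ===== LEMMAS AND PROOFS =====

-- dedup relative to an already-seen accumulator: the shape of A's append-if-absent loops
def dedupExcl (a : List String) : List String → List String
  | [] => []
  | x :: l => if x ∈ a then dedupExcl a l else x :: dedupExcl (a ++ [x]) l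

theorem foldl_dedupAppend (l a : List String) :
    l.foldl (fun acc x => if x ∈ acc then acc else acc ++ [x]) a = a ++ dedupExcl a l := by
  induction l generalizing a with
  | nil => simp [dedupExcl]
  | cons x l ih =>
    simp only [List.foldl_cons, dedupExcl]
    by_cases hx : x ∈ a
    · simp [hx, ih]
    · simp [hx, ih (a ++ [x])]

theorem mem_dedupExcl {x : String} {a l : List String} :
    x ∈ dedupExcl a l ↔ x ∈ l ∧ x ∉ a := by
  induction l generalizing a with
  | nil => simp [dedupExcl]
  | cons y l ih =>
    simp only [dedupExcl]
    by_cases hy : y ∈ a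
    · simp only [if_pos hy, ih, List.mem_cons]
      constructor
      · rintro ⟨h1, h2⟩; exact ⟨Or.inr h1, h2⟩
      · rintro ⟨h1 | h1, h2⟩
        · subst h1; exact absurd hy h2
        · exact ⟨h1, h2⟩
    · simp only [if_neg hy, List.mem_cons, ih]
      constructor
      · rintro (rfl | ⟨h1, h2⟩)
        · exact ⟨Or.inl rfl, hy⟩
        · simp at h2; exact ⟨Or.inr h1, h2.1⟩
      · rintro ⟨rfl | h1, h2⟩
        · exact Or.inl rfl
        · by_cases hxy : x = y
          · exact Or.inl hxy
          · exact Or.inr ⟨h1, by simp [h2, hxy]⟩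

theorem sublist_dedupExcl (a l : List String) : (dedupExcl a l).Sublist l := by
  induction l generalizing a with
  | nil => simp [dedupExcl]
  | cons y l ih =>
    simp only [dedupExcl]
    by_cases hy : y ∈ a
    · simp only [if_pos hy]; exact (ih a).cons y
    · simp only [if_neg hy]; exact (ih (a ++ [y])).cons₂ y

theorem nodup_dedupExcl (a l : List String) : (dedupExcl a l).Nodup := by
  induction l generalizing a with
  | nil => simp [dedupExcl]
  | cons y l ih =>
    simp only [dedupExcl]
    by_cases hy : y ∈ a
    · simp only [if_pos hy]; exact ih a
    · simp only [if_neg hy]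
      refine List.Nodup.cons ?_ (ih (a ++ [y]))
      intro hmem
      rcases mem_dedupExcl.mp hmem with ⟨_, h2⟩
      simp at h2

theorem filter_dedupExcl (p : String → Bool) (a l : List String) :
    (dedupExcl a l).filter p = dedupExcl (a.filter p) (l.filter p) := by
  induction l generalizing a with
  | nil => simp [dedupExcl]
  | cons y l ih =>
    simp only [dedupExcl, List.filter_cons]
    by_cases hy : y ∈ a
    · have : y ∈ a.filter p ∨ p y = false := by
        by_cases hp : p y
        · exact Or.inl (List.mem_filter.mpr ⟨hy, hp⟩)
        · exact Or.inr (by simpa using hp)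
      rcases this with h | h
      · cases hp : p y
        · simp [if_pos hy, hp, ih]
        · simp [if_pos hy, hp, dedupExcl, if_pos h, ih]
      · simp [if_pos hy, h, ih]
    · cases hp : p y
      · -- p y false: y dropped from both filters; note (a++[y]).filter p = a.filter p
        simp only [if_neg hy, List.filter_cons, hp, cond_false, List.filter]
        have := ih (a ++ [y])
        simp only [List.filter_append, List.filter_cons, hp] at this
        simpa using this
      · have hyf : y ∉ a.filter p := fun h => hy (List.mem_filter.mp h).1
        simp only [if_neg hy, List.filter_cons, hp, if_true]
        rw [show dedupExcl (a.filter p) (y :: l.filter p)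
              = if y ∈ a.filter p then dedupExcl (a.filter p) (l.filter p)
                else y :: dedupExcl (a.filter p ++ [y]) (l.filter p) from rfl]
        rw [if_neg hyf]
        have := ih (a ++ [y])
        simp only [List.filter_append, List.filter_cons, hp] at this
        simpa using this

theorem pydedup_eq_dedupExcl (l : List String) : PySem.List.dedup l = dedupExcl [] l := by
  have h : ∀ (l : List String) (a : List String),
      l.foldl PySem.Set.add a = l.foldl (fun acc x => if x ∈ acc then acc else acc ++ [x]) a := by
    intro l
    induction l with
    | nil => intro a; rfl
    | cons x l ih =>
      intro a
      simp only [List.foldl_cons, PySem.Set.add]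
      rw [ih]
      congr 1
      by_cases hx : x ∈ a
      · simp [PySem.Set.contains, hx, List.elem_eq_contains]
      · simp [PySem.Set.contains, hx, List.elem_eq_contains]
  rw [show PySem.List.dedup l = PySem.Set.ofList l from by simp,
      PySem.Set.ofList_eq_foldl, h, foldl_dedupAppend]
  rfl

-- stability of PySem's insertion sort, per key class
theorem insertBy_filter_class {κ : Type} [LinearOrder κ] (key : String → κ) (c : κ)
    (x : String) (acc : List String) (h : acc.Pairwise (fun a b => key a ≤ key b)) :
    (PySem.List.insertBy (fun a b => decide (key a < key b)) x acc).filter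
        (fun y => decide (key y = c))
      = if key x = c then acc.filter (fun y => decide (key y = c)) ++ [x]
        else acc.filter (fun y => decide (key y = c)) := by
  induction acc with
  | nil =>
    simp only [PySem.List.insertBy, List.filter_cons, List.filter_nil]
    by_cases hc : key x = c <;> simp [hc]
  | cons y ys ih =>
    rcases List.pairwise_cons.mp h with ⟨hy, hys⟩
    by_cases hlt : key x < key y
    · rw [show PySem.List.insertBy (fun a b => decide (key a < key b)) x (y :: ys)
            = if decide (key x < key y) = true then x :: y :: ys
              else y :: PySem.List.insertBy (fun a b => decide (key a < key b)) x ys from rfl]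
      simp only [decide_eq_true_eq, if_pos hlt]
      by_cases hc : key x = c
      · -- every element of y :: ys has key > c, so its filter is empty
        have hnil : (y :: ys).filter (fun y => decide (key y = c)) = [] := by
          rw [List.filter_eq_nil_iff]
          intro z hz
          have : key y ≤ key z := by
            rcases List.mem_cons.mp hz with rfl | hz'
            · exact le_refl _
            · exact hy z hz'
          have : key x < key z := lt_of_lt_of_le hlt this
          simp [hc ▸ ne_of_gt this]
        rw [if_pos hc, hnil, List.filter_cons, hnil]
        simp [hc]
      · rw [if_neg hc]
        simp only [List.filter_cons, hc, decide_false]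
        simp
    · rw [show PySem.List.insertBy (fun a b => decide (key a < key b)) x (y :: ys)
            = if decide (key x < key y) = true then x :: y :: ys
              else y :: PySem.List.insertBy (fun a b => decide (key a < key b)) x ys from rfl]
      simp only [decide_eq_true_eq, if_neg hlt]
      rw [List.filter_cons, List.filter_cons]
      rw [ih hys]
      by_cases hc : key x = c <;> by_cases hyc : key y = c <;>
        simp [hc, hyc]

theorem sorted_filter_class {κ : Type} [LinearOrder κ] (xs : List String) (key : String → κ) (c : κ) :
    (PySem.List.sorted xs key false).filter (fun y => decide (key y = c))
      = xs.filter (fun y => decide (key y = c)) := by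
  induction xs using List.reverseRecOn with
  | nil => rfl
  | append_singleton l x ih =>
    have hsnoc : PySem.List.sorted (l ++ [x]) key false
        = PySem.List.insertBy (fun a b => decide (key a < key b)) x (PySem.List.sorted l key false) := by
      rw [PySem.List.sorted_eq_foldl_insertBy, PySem.List.sorted_eq_foldl_insertBy, List.foldl_append]
      rfl
    rw [hsnoc, insertBy_filter_class key c x _ (PySem.List.sorted_pairwise l key), List.filter_append]
    by_cases hc : key x = c
    · rw [if_pos hc, ih]; simp [hc]
    · rw [if_neg hc, ih]; simp [hc]

theorem sorted_unique {κ : Type} [LinearOrder κ] (key : String → κ) :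
    ∀ (ys zs : List String), ys.Pairwise (fun a b => key a ≤ key b) →
      zs.Pairwise (fun a b => key a ≤ key b) →
      (∀ c : κ, ys.filter (fun y => decide (key y = c)) = zs.filter (fun y => decide (key y = c))) →
      ys = zs := by
  intro ys
  induction ys with
  | nil =>
    intro zs _ _ hf
    cases zs with
    | nil => rfl
    | cons b zs' =>
      have := hf (key b)
      simp at this
  | cons a ys' ih =>
    intro zs hy hz hf
    cases zs with
    | nil =>
      have := hf (key a)
      simp at this
    | cons b zs' =>
      rcases List.pairwise_cons.mp hy with ⟨hya, hys'⟩
      rcases List.pairwise_cons.mp hz with ⟨hzb, hzs'⟩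
      rcases lt_trichotomy (key a) (key b) with hlt | heq | hgt
      · exfalso
        have h1 := hf (key a)
        have hqa : decide (key a = key a) = true := by simp
        have hqb : decide (key b = key a) = false := by
          simp only [decide_eq_false_iff_not]; exact ne_of_gt hlt
        have hnil : zs'.filter (fun y => decide (key y = key a)) = [] := by
          refine List.filter_eq_nil_iff.mpr (fun z hz' => ?_)
          have hlt2 := lt_of_lt_of_le hlt (hzb z hz')
          simpa using ne_of_gt hlt2
        simp only [List.filter_cons, hqa, hqb, if_true, Bool.false_eq_true, if_false, hnil] at h1
        simp at h1
      · have h1 := hf (key a)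
        have hqa : decide (key a = key a) = true := by simp
        have hqb : decide (key b = key a) = true := by simp [heq]
        simp only [List.filter_cons, hqa, hqb, if_true] at h1
        obtain ⟨hab, htail⟩ := List.cons.inj h1
        have htails : ys' = zs' := by
          apply ih zs' hys' hzs'
          intro c
          by_cases hc : c = key a
          · subst hc; exact htail
          · have h2 := hf c
            have hqa' : decide (key a = c) = false := by
              simp only [decide_eq_false_iff_not]; exact fun h => hc h.symm
            have hqb' : decide (key b = c) = false := by
              simp only [decide_eq_false_iff_not, ← heq]; exact fun h => hc h.symm
            simpa only [List.filter_cons, hqa', hqb', Bool.false_eq_true, if_false] using h2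
        rw [hab, htails]
      · exfalso
        have h1 := hf (key b)
        have hqa : decide (key a = key b) = false := by
          simp only [decide_eq_false_iff_not]; exact ne_of_gt hgt
        have hqb : decide (key b = key b) = true := by simp
        have hnil : ys'.filter (fun y => decide (key y = key b)) = [] := by
          refine List.filter_eq_nil_iff.mpr (fun z hz' => ?_)
          have hlt2 := lt_of_lt_of_le hgt (hya z hz')
          simpa using ne_of_gt hlt2
        simp only [List.filter_cons, hqa, hqb, if_true, Bool.false_eq_true, if_false, hnil] at h1
        simp at h1

theorem sorted_eq_of_stable {κ : Type} [LinearOrder κ] (xs zs : List String) (key : String → κ)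
    (hz : zs.Pairwise (fun a b => key a ≤ key b))
    (hf : ∀ c : κ, xs.filter (fun y => decide (key y = c)) = zs.filter (fun y => decide (key y = c))) :
    PySem.List.sorted xs key false = zs := by
  refine sorted_unique key _ _ (PySem.List.sorted_pairwise xs key) hz ?_
  intro c
  rw [sorted_filter_class xs key c]
  exact hf c

-- sorted2's lexicographic comparison is sorted with the Lex-product key
theorem sorted2_eq_sorted_lex (xs : List String) (k1 : String → Int) (k2 : String → String) :
    PySem.List.sorted2 xs k1 k2 false
      = PySem.List.sorted xs (fun x => toLex (k1 x, k2 x)) false := by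
  have hcomp : (fun a b => decide (k1 a < k1 b) || (!decide (k1 b < k1 a) && decide (k2 a < k2 b)))
      = (fun a b : String => decide (toLex (k1 a, k2 a) < toLex (k1 b, k2 b))) := by
    funext a b
    rcases lt_trichotomy (k1 a) (k1 b) with h | h | h
    · simp [h, Prod.Lex.lt_iff, le_of_lt h, not_lt_of_gt h]
    · simp [h, Prod.Lex.lt_iff, lt_irrefl]
    · have h1 : decide (k1 a < k1 b) = false := by simp [not_lt_of_gt h]
      have h2 : decide (k1 b < k1 a) = true := by simp [h]
      have h3 : decide (toLex (k1 a, k2 a) < toLex (k1 b, k2 b)) = false := by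
        simp only [decide_eq_false_iff_not, Prod.Lex.lt_iff, ofLex_toLex]
        rintro (hlt | ⟨he, -⟩)
        · exact absurd hlt (not_lt_of_gt h)
        · exact absurd he (ne_of_gt h)
      simp [h1, h2, h3]
  rw [PySem.List.sorted_eq_foldl_insertBy]
  rw [show PySem.List.sorted2 xs k1 k2 false
        = xs.foldl (fun acc x => PySem.List.insertBy
            (fun a b => decide (k1 a < k1 b) || (!decide (k1 b < k1 a) && decide (k2 a < k2 b))) x acc) []
      from rfl]
  rw [hcomp]

-- two nodup lists with the same members, all of whose members coincide, are equal
theorem eq_of_nodup_of_unique (l l' : List String) (h : l.Nodup) (h' : l'.Nodup)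
    (hm : ∀ x, x ∈ l ↔ x ∈ l') (hu : ∀ x y, x ∈ l → y ∈ l → x = y) : l = l' := by
  cases l with
  | nil =>
    cases l' with
    | nil => rfl
    | cons b t' => exact absurd ((hm b).mpr (by simp)) (by simp)
  | cons a t =>
    have ht : t = [] := by
      cases t with
      | nil => rfl
      | cons u t2 =>
        have : u = a := (hu u a (by simp) (by simp)).symm ▸ hu u a (by simp) (by simp)
        exact absurd (this ▸ (by simp : u ∈ u :: t2)) (by
          intro hmem
          exact (List.nodup_cons.mp h).1 (this ▸ hmem))
    subst ht
    cases l' with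
    | nil => exact absurd ((hm a).mp (by simp)) (by simp)
    | cons b t' =>
      have hb : b = a := by
        have hbl : b ∈ [a] := (hm b).mpr (by simp)
        simpa using hbl
      subst hb
      have ht' : t' = [] := by
        cases t' with
        | nil => rfl
        | cons u t2 =>
          have hu2 : u ∈ [b] := (hm u).mpr (by simp)
          have : u = b := by simpa using hu2
          exact absurd (this ▸ (by simp : u ∈ u :: t2)) (by
            intro hmem
            exact (List.nodup_cons.mp h').1 (this ▸ hmem))
      rw [ht']

-- the rank dict of B and the `ordered` list of A's first loop grow in lock step
theorem joint_inv (mm : PySem.Dict String String) :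
    ∀ (ps : List (Int × String)) (r : PySem.Dict String Int) (ord : List String),
      r.keys = ord → r.keys.Nodup → (∀ v ∈ ord, v ∈ mm.values) →
      ((r.items.map (·.2) ++ ps.map (·.1)).Pairwise (· < ·)) →
      (let r' := ps.foldl (fun rank p =>
          match mm.get? (PySem.Str.lower (PySem.Str.strip p.2)) with
          | some v => if rank.contains v then rank else rank.insert v p.1
          | none => rank) r
       let ord' := ps.foldl (fun ordered p =>
          match mm.get? (PySem.Str.lower (PySem.Str.strip p.2)) with
          | some v => if v ∈ ordered then ordered else ordered ++ [v]
          | none => ordered) ord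
       r'.keys = ord' ∧ r'.keys.Nodup ∧ (∀ v ∈ ord', v ∈ mm.values) ∧
         (r'.items.map (·.2)).Pairwise (· < ·) ∧
         (∀ j ∈ r'.items.map (·.2), j ∈ r.items.map (·.2) ∨ j ∈ ps.map (·.1))) := by
  intro ps
  induction ps with
  | nil =>
    intro r ord hkeys hnd hmem hpair
    refine ⟨hkeys, hnd, hmem, ?_, fun j hj => Or.inl hj⟩
    simpa using hpair
  | cons p tl ih =>
    intro r ord hkeys hnd hmem hpair
    simp only [List.foldl_cons]
    cases hv : mm.get? (PySem.Str.lower (PySem.Str.strip p.2)) with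
    | none =>
      simp only [hv]
      have hpair' : ((r.items.map (·.2) ++ tl.map (·.1)).Pairwise (· < ·)) := by
        refine List.Pairwise.sublist ?_ hpair
        exact List.Sublist.append_left (List.sublist_cons_self _ _) _
      obtain ⟨h1, h2, h3, h4, h5⟩ := ih r ord hkeys hnd hmem hpair'
      exact ⟨h1, h2, h3, h4, fun j hj => (h5 j hj).imp id (fun h => by simp [h])⟩
    | some v =>
      simp only [hv]
      by_cases hc : r.contains v
      · have hvord : v ∈ ord := hkeys ▸ (PySem.Dict.contains_iff_mem_keys r v).mp hc
        simp only [hc, if_true, if_pos hvord]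
        have hpair' : ((r.items.map (·.2) ++ tl.map (·.1)).Pairwise (· < ·)) := by
          refine List.Pairwise.sublist ?_ hpair
          exact List.Sublist.append_left (List.sublist_cons_self _ _) _
        obtain ⟨h1, h2, h3, h4, h5⟩ := ih r ord hkeys hnd hmem hpair'
        exact ⟨h1, h2, h3, h4, fun j hj => (h5 j hj).imp id (fun h => by simp [h])⟩
      · have hcf : r.contains v = false := by simpa using hc
        have hvord : v ∉ ord := fun h =>
          hc ((PySem.Dict.contains_iff_mem_keys r v).mpr (hkeys ▸ h))
        simp only [hcf, Bool.false_eq_true, if_false, if_neg hvord]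
        have hkeys' : (r.insert v p.1).keys = ord ++ [v] := by
          rw [PySem.Dict.keys_insert_of_not_contains r p.1 hcf, hkeys]
        have hitems' : (r.insert v p.1).items = r.items ++ [(v, p.1)] :=
          PySem.Dict.items_insert_of_not_contains r p.1 hcf
        have hnd' : (r.insert v p.1).keys.Nodup := by
          rw [hkeys']
          rw [List.nodup_append]
          refine ⟨hkeys ▸ hnd, by simp, ?_⟩
          intro a ha b hb
          have hb' : b = v := by simpa using hb
          subst hb'
          exact fun h => hvord (h ▸ ha)
        have hmem' : ∀ w ∈ ord ++ [v], w ∈ mm.values := by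
          intro w hw
          rcases List.mem_append.mp hw with h | h
          · exact hmem w h
          · have : w = v := by simpa using h
            subst this
            have : (PySem.Str.lower (PySem.Str.strip p.2), w) ∈ mm.items :=
              PySem.Dict.mem_items_of_get?_eq_some mm hv
            simpa [PySem.Dict.values] using List.mem_map_of_mem this (f := (·.2))
        have hpair' : (((r.insert v p.1).items.map (·.2) ++ tl.map (·.1)).Pairwise (· < ·)) := by
          rw [hitems']
          simpa using hpair
        obtain ⟨h1, h2, h3, h4, h5⟩ := ih (r.insert v p.1) (ord ++ [v]) hkeys' hnd' hmem' hpair'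
        refine ⟨h1, h2, h3, h4, fun j hj => ?_⟩
        rcases h5 j hj with h | h
        · rw [hitems'] at h
          simp only [List.map_append, List.mem_append] at h
          rcases h with h | h
          · exact Or.inl h
          · exact Or.inr (by simpa using Or.inl (by simpa using h))
        · exact Or.inr (by simp [h])

-- the heart of the file: for ANY member_map dict the two computations agree
theorem core (mm : PySem.Dict String String) (nicks : List String) :
    ((PySem.List.sorted mm.values (fun m => PySem.Str.lower m) false).foldl
      (fun ordered member => if member ∈ ordered then ordered else ordered ++ [member])
      (nicks.foldl
        (fun ordered nick =>
          match mm.get? (PySem.Str.lower (PySem.Str.strip nick)) with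
          | some v => if v ∈ ordered then ordered else ordered ++ [v]
          | none => ordered)
        []))
    = PySem.List.sorted2 (PySem.List.dedup mm.values)
        (fun v => ((PySem.List.enumerate nicks).foldl
            (fun rank p =>
              match mm.get? (PySem.Str.lower (PySem.Str.strip p.2)) with
              | some v => if rank.contains v then rank else rank.insert v p.1
              | none => rank)
            PySem.Dict.empty).getD v (nicks.length : Int))
        (fun v => PySem.Str.lower v) false := by
  -- names
  set rd := (PySem.List.enumerate nicks).foldl
      (fun rank p =>
        match mm.get? (PySem.Str.lower (PySem.Str.strip p.2)) with
        | some v => if rank.contains v then rank else rank.insert v p.1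
        | none => rank)
      (PySem.Dict.empty : PySem.Dict String Int) with hrd
  set P := nicks.foldl
      (fun ordered nick =>
        match mm.get? (PySem.Str.lower (PySem.Str.strip nick)) with
        | some v => if v ∈ ordered then ordered else ordered ++ [v]
        | none => ordered)
      ([] : List String) with hPdef
  set s : Int := (nicks.length : Int) with hs
  set L := mm.values with hL
  set Slo := PySem.List.sorted L (fun m => PySem.Str.lower m) false with hSlo
  -- A's first loop is the fold of the same step over the enumerated list
  have hPenum : P = (PySem.List.enumerate nicks).foldl
      (fun ordered p =>
        match mm.get? (PySem.Str.lower (PySem.Str.strip p.2)) with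
        | some v => if v ∈ ordered then ordered else ordered ++ [v]
        | none => ordered) [] := by
    rw [hPdef]
    conv_lhs => rw [← PySem.List.map_snd_enumerate nicks 0]
    rw [List.foldl_map]
  -- invariant facts about rd and P
  obtain ⟨hk, hnd, hmemvals, hpairsnd, hbound⟩ :=
    joint_inv mm (PySem.List.enumerate nicks) PySem.Dict.empty [] (by simp) (by simp)
      (by simp) (by
        rw [show (PySem.Dict.empty : PySem.Dict String Int).items = [] from rfl]
        simp only [List.map_nil, List.nil_append]
        exact List.pairwise_map.mpr (PySem.List.pairwise_lt_enumerate nicks 0))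
  rw [← hPenum] at hk hmemvals
  -- the composite sort key
  set key : String → Lex (Int × String) := fun v => toLex (rd.getD v s, PySem.Str.lower v)
    with hkey
  have R4 : ∀ v, v ∉ P → rd.getD v s = s := by
    intro v hv
    refine PySem.Dict.getD_of_not_contains rd s ?_
    cases hcv : rd.contains v with
    | false => rfl
    | true => exact absurd (hk ▸ (PySem.Dict.contains_iff_mem_keys rd v).mp hcv) hv
  have Ritem : ∀ v ∈ P, ∃ i, (v, i) ∈ rd.items ∧ rd.getD v s = i := by
    intro v hv
    rw [← hk] at hv
    have hv' : v ∈ rd.items.map (·.1) := by simpa [PySem.Dict.keys] using hv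
    rcases List.mem_map.mp hv' with ⟨q, hq, hq1⟩
    refine ⟨q.2, ?_, ?_⟩
    · rw [show (v, q.2) = q from by rw [← hq1]]
      exact hq
    · have hmem : (v, q.2) ∈ rd.items := by
        rw [show (v, q.2) = q from by rw [← hq1]]
        exact hq
      exact PySem.Dict.getD_of_mem_items rd hmem hnd s
  have R2 : ∀ v ∈ P, 0 ≤ rd.getD v s ∧ rd.getD v s < s := by
    intro v hv
    rcases Ritem v hv with ⟨i, hi, hgd⟩
    have : i ∈ rd.items.map (·.2) := List.mem_map_of_mem hi (f := (·.2))
    rcases hbound i this with h | h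
    · rw [show (PySem.Dict.empty : PySem.Dict String Int).items = [] from rfl] at h
      simp at h
    · rw [PySem.List.map_fst_enumerate] at h
      have := PySem.List.mem_pyRange_one.mp h
      rw [hgd]
      constructor <;> omega
  have R3 : P.Pairwise (fun a b => rd.getD a s < rd.getD b s) := by
    have hip : rd.items.Pairwise (fun p q => p.2 < q.2) := List.pairwise_map.mp hpairsnd
    have : rd.items.Pairwise (fun p q => rd.getD p.1 s < rd.getD q.1 s) := by
      refine hip.imp_of_mem ?_
      intro p q hp hq hlt
      rw [PySem.Dict.getD_of_mem_items rd (by exact hp) hnd s,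
          PySem.Dict.getD_of_mem_items rd (by exact hq) hnd s]
      exact hlt
    rw [← hk]
    exact List.pairwise_map.mpr this
  have hPnodup : P.Nodup := hk ▸ hnd
  have R5 : ∀ v ∈ P, v ∈ L := hk ▸ hmemvals
  -- A's output
  rw [foldl_dedupAppend]
  -- B's output
  rw [sorted2_eq_sorted_lex, pydedup_eq_dedupExcl]
  -- sorted(D, key) = P ++ dedupExcl P Slo by uniqueness of the stable sort
  show P ++ dedupExcl P Slo = PySem.List.sorted (dedupExcl [] L) key false
  refine (sorted_eq_of_stable _ _ key ?_ ?_).symm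
  · -- P ++ dedupExcl P Slo is ordered under key
    rw [List.pairwise_append]
    refine ⟨?_, ?_, ?_⟩
    · refine R3.imp_of_mem ?_
      intro a b _ _ hlt
      simp only [hkey, Prod.Lex.le_iff, ofLex_toLex]
      exact Or.inl hlt
    · have hSpair : Slo.Pairwise (fun a b => PySem.Str.lower a ≤ PySem.Str.lower b) :=
        PySem.List.sorted_pairwise L (fun m => PySem.Str.lower m)
    -- elements of dedupExcl P Slo are outside P, hence share first key s
      have := hSpair.sublist (sublist_dedupExcl P Slo)
      refine this.imp_of_mem ?_
      intro a b ha hb hle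
      simp only [hkey, Prod.Lex.le_iff, ofLex_toLex]
      refine Or.inr ⟨?_, hle⟩
      rw [R4 a (mem_dedupExcl.mp ha).2, R4 b (mem_dedupExcl.mp hb).2]
    · intro a ha b hb
      simp only [hkey, Prod.Lex.le_iff, ofLex_toLex]
      refine Or.inl ?_
      rw [R4 b (mem_dedupExcl.mp hb).2]
      exact (R2 a ha).2
  · -- per-class filters agree
    intro c
    have hqiff : ∀ y, (key y = c) ↔ (rd.getD y s = (ofLex c).1 ∧ PySem.Str.lower y = (ofLex c).2) := by
      intro y
      rw [hkey]
      constructor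
      · intro h; rw [← h]; exact ⟨rfl, rfl⟩
      · rintro ⟨h1, h2⟩
        have : ofLex (toLex (rd.getD y s, PySem.Str.lower y)) = ofLex c := Prod.ext h1 h2
        simpa using this
    have hqsplit : (fun y => decide (key y = c))
        = fun y => decide (rd.getD y s = (ofLex c).1) && decide (PySem.Str.lower y = (ofLex c).2) := by
      funext y
      rw [← Bool.decide_and]
      exact decide_eq_decide.mpr (hqiff y)
    rw [List.filter_append]
    by_cases hi : (ofLex c).1 = s
    · -- the inactive class: P contributes nothing, stability of the casefold sort does the rest
      have hPnil : P.filter (fun y => decide (key y = c)) = [] := by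
        refine List.filter_eq_nil_iff.mpr (fun v hv => ?_)
        simp only [decide_eq_true_eq]
        intro hkc
        have := ((hqiff v).mp hkc).1
        have := (R2 v hv).2
        omega
      rw [hPnil, List.nil_append, filter_dedupExcl, filter_dedupExcl, hPnil]
      rw [show (([] : List String).filter _) = [] from rfl]
      congr 1
      rw [hqsplit, ← List.filter_filter, ← List.filter_filter]
      congr 1
      rw [hSlo]
      exact (sorted_filter_class L (fun m => PySem.Str.lower m) (ofLex c).2).symm
    · -- an active class: at most one member, present on both sides exactly when active
      have hTnil : (dedupExcl P Slo).filter (fun y => decide (key y = c)) = [] := by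
        refine List.filter_eq_nil_iff.mpr (fun v hv => ?_)
        simp only [decide_eq_true_eq]
        intro hkc
        exact hi (((hqiff v).mp hkc).1 ▸ (R4 v (mem_dedupExcl.mp hv).2).symm ▸ rfl)
      rw [hTnil, List.append_nil]
      refine eq_of_nodup_of_unique _ _ ((nodup_dedupExcl [] L).filter _) (hPnodup.filter _) ?_ ?_
      · intro x
        simp only [List.mem_filter, mem_dedupExcl, List.not_mem_nil, not_false_iff, and_true]
        constructor
        · rintro ⟨hxL, hq⟩
          refine ⟨?_, hq⟩
          by_contra hxP
          exact hi ((((hqiff x).mp (by simpa using hq)).1 ▸ (R4 x hxP).symm ▸ rfl))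
        · rintro ⟨hxP, hq⟩
          exact ⟨R5 x hxP, hq⟩
      · intro x y hx hy
        rcases List.mem_filter.mp hx with ⟨hx1, hqx⟩
        rcases List.mem_filter.mp hy with ⟨hy1, hqy⟩
        have hxP : x ∈ P := by
          by_contra hxP
          exact hi ((((hqiff x).mp (by simpa using hqx)).1 ▸ (R4 x hxP).symm ▸ rfl))
        have hyP : y ∈ P := by
          by_contra hyP
          exact hi ((((hqiff y).mp (by simpa using hqy)).1 ▸ (R4 y hyP).symm ▸ rfl))
        by_contra hne
        have hdist : ∀ a ∈ P, ∀ b ∈ P, a ≠ b → rd.getD a s ≠ rd.getD b s := by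
          have hne' : P.Pairwise (fun a b => rd.getD a s ≠ rd.getD b s) :=
            R3.imp (fun h => ne_of_lt h)
          have hsym : Symmetric (fun a b : String => rd.getD a s ≠ rd.getD b s) :=
            fun a b h => Ne.symm h
          exact fun a ha b hb hab => hne'.forall hsym ha hb hab
        have h1 := ((hqiff x).mp (by simpa using hqx)).1
        have h2 := ((hqiff y).mp (by simpa using hqy)).1
        exact hdist x hxP y hyP hne (h1.trans h2.symm)

-- ===== VERDICT (by name: the statement is the Claim_ definition above) =====
theorem ordered_members_py_spec : Claim_equal_ordered_members_py := by
  intro members active_nicks _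
  show ordered_members_py members active_nicks = ordered_members_py_alt members active_nicks
  unfold ordered_members_py ordered_members_py_alt
  exact core (pvMemberMap members) active_nicks
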